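-- pv_equiv track=rewrite | github.com/christabor/MoAL | languages/formal_language_theory/grammars/analytic_context_free.py | _evaluate_all
-- ===== SOURCE A (Python) =====
-- def _evaluate_all(start, rules=[], terminals=[]):
--     """Non-recursive simple function, for first iteration."""
--     lefts = rules.keys()
--     copy = ''
--     for token in list(start):
--         if token in lefts:
--             if rules[token] in terminals:
--                 # Break out, as we are done with all evaluations
--                 return copy
--             token = rules[token]
--             copy += token
--     return copy
-- ===== SOURCE B (Python) =====
-- def _evaluate_all(start, rules=[], terminals=[]):
--     """Two-pass: find the stop boundary, then join productions before it."""
--     tokens = list(start)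
--     stop = next((i for i, t in enumerate(tokens)
--                  if t in rules and rules[t] in terminals), len(tokens))
--     return ''.join(rules[t] for t in tokens[:stop] if t in rules)
-- ===== Notes on version B (the rewrite author's own statement) =====
-- stated objective: alternative
-- what changed: Replaces A's single accumulate-or-early-return loop by a two-pass decomposition: first find the stop boundary (first token whose production is a terminal), then join the productions of the rule-keyed tokens before that boundary.
import Mathlib
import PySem

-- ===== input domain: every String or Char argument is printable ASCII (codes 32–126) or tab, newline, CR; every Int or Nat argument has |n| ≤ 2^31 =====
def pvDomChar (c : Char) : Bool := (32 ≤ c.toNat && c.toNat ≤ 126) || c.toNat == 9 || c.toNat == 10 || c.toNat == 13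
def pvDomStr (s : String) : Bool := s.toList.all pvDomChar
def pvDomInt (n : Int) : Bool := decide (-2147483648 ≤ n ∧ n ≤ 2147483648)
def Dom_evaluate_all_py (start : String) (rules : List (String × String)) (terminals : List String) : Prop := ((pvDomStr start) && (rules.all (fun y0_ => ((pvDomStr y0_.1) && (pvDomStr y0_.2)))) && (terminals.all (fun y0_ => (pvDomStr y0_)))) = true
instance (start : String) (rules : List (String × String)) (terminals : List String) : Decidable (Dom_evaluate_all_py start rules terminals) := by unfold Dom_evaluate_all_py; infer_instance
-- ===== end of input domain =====

-- B changes the decomposition: instead of A's single accumulate-or-early-return loop, B first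
-- finds the stop boundary and then joins the productions before it (objective: alternative).

-- ===== PORT A =====
-- the loop of _evaluate_all: accumulator `copy`, early return on a terminal production
def pvAGo (d : PySem.Dict String String) (terminals : List String) : List Char → String → String
  | [], copy => copy
  | c :: rest, copy =>
    match d.get? c.toString with
    | some v => if terminals.contains v then copy else pvAGo d terminals rest (copy ++ v)
    | none => pvAGo d terminals rest copy

def evaluate_all_py (start : String) (rules : List (String × String)) (terminals : List String) : String :=
  pvAGo (PySem.Dict.ofList rules) terminals start.toList ""

-- ===== PORT B =====
def evaluate_all_py_alt (start : String) (rules : List (String × String)) (terminals : List String) : String :=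
  let d := PySem.Dict.ofList rules
  let tokens := start.toList
  let stop := (tokens.findIdx? (fun c =>
      match d.get? c.toString with
      | some v => terminals.contains v
      | none => false)).getD tokens.length
  String.join ((tokens.take stop).filterMap (fun c => d.get? c.toString))

-- ===== PRECONDITION & SPEC =====
def Spec_evaluate_all_py (start : String) (rules : List (String × String)) (terminals : List String) (out : String) : Prop := out = evaluate_all_py_alt start rules terminals
instance (start : String) (rules : List (String × String)) (terminals : List String) (out : String) : Decidable (Spec_evaluate_all_py start rules terminals out) := by unfold Spec_evaluate_all_py; infer_instance

-- ===== CLAIM (what is proved, stated in full; the proofs are below) =====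
def Claim_equal_evaluate_all_py : Prop := ∀ (start : String) (rules : List (String × String)) (terminals : List String), Dom_evaluate_all_py start rules terminals → Spec_evaluate_all_py start rules terminals (evaluate_all_py start rules terminals)

-- ===== LEMMAS AND PROOFS =====

theorem pv_foldl_append_str (l : List String) : ∀ a : String, l.foldl (· ++ ·) a = a ++ l.foldl (· ++ ·) "" := by
  induction l with
  | nil => intro a; simp
  | cons x xs ih => intro a; simp only [List.foldl_cons]; rw [ih (a ++ x), ih (("" : String) ++ x)]; simp [String.append_assoc]

theorem pv_join_cons (s : String) (l : List String) : String.join (s :: l) = s ++ String.join l := by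
  simp only [String.join, List.foldl_cons]
  rw [pv_foldl_append_str]
  simp

-- B's value on a token list, written as "boundary then join"
def pvBVal (d : PySem.Dict String String) (terminals : List String) (cs : List Char) : String :=
  String.join ((cs.take ((cs.findIdx? (fun c =>
      match d.get? c.toString with
      | some v => terminals.contains v
      | none => false)).getD cs.length)).filterMap (fun c => d.get? c.toString))

theorem pv_go_eq (d : PySem.Dict String String) (terminals : List String) :
    ∀ (cs : List Char) (copy : String),
      pvAGo d terminals cs copy = copy ++ pvBVal d terminals cs := by
  intro cs
  induction cs with
  | nil => intro copy; simp [pvAGo, pvBVal, String.join]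
  | cons c rest ih =>
    intro copy
    have hstep : ∀ (o : Option String), d.get? c.toString = o →
        (o = none ∨ ∃ v, o = some v ∧ terminals.contains v = false) →
        pvBVal d terminals (c :: rest) =
          (match o with
           | some v => v
           | none => "") ++ pvBVal d terminals rest := by
      intro o ho hcase
      unfold pvBVal
      rw [List.findIdx?_cons]
      have hp : (match d.get? c.toString with
                 | some v => terminals.contains v
                 | none => false) = false := by
        rcases hcase with h1 | ⟨v, h1, h2⟩
        · rw [ho, h1]
        · rw [ho, h1]; exact h2
      rw [hp]
      simp only [Bool.false_eq_true, if_false]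
      cases hf : rest.findIdx? (fun c => match d.get? c.toString with
                 | some v => terminals.contains v
                 | none => false) with
      | none =>
        simp only [Option.map_none, Option.getD_none, List.length_cons,
          List.take_succ_cons, List.filterMap_cons]
        rcases hcase with h1 | ⟨v, h1, _⟩ <;> rw [ho] <;> subst h1 <;>
          simp [pv_join_cons]
      | some i =>
        simp only [Option.map_some, Option.getD_some, List.take_succ_cons,
          List.filterMap_cons]
        rcases hcase with h1 | ⟨v, h1, _⟩ <;> rw [ho] <;> subst h1 <;>
          simp [pv_join_cons]
    cases ho : d.get? c.toString with
    | none =>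
      simp only [pvAGo, ho]
      rw [ih, hstep none ho (Or.inl rfl)]
      simp
    | some v =>
      by_cases ht : terminals.contains v = true
      · simp only [pvAGo, ho, ht, if_pos]
        unfold pvBVal
        rw [List.findIdx?_cons]
        have hp : (match d.get? c.toString with
                   | some v => terminals.contains v
                   | none => false) = true := by rw [ho]; exact ht
        rw [hp]
        simp [String.join]
      · have ht' : terminals.contains v = false := by simpa using ht
        simp only [pvAGo, ho, ht', Bool.false_eq_true, if_false]
        rw [ih, hstep (some v) ho (Or.inr ⟨v, rfl, ht'⟩)]
        simp [String.append_assoc]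

theorem evaluate_all_py_spec : Claim_equal_evaluate_all_py := by
  intro start rules terminals _
  unfold Spec_evaluate_all_py evaluate_all_py evaluate_all_py_alt
  rw [pv_go_eq]
  simp [pvBVal]
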